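-- pv_equiv track=rewrite | github.com/yixiliu617/AlphaGraph_new | tools/web_scraper/_news_cluster.py | extract_anchors
-- ===== SOURCE A (Python) =====
-- _STOPWORDS = frozenset({
--     "about", "after", "again", "among", "being", "could", "every",
--     "first", "going", "having", "later", "never", "other", "since",
--     "still", "their", "there", "these", "those", "under", "until",
--     "which", "while", "would", "should", "quarter", "report",
--     "shares", "stock", "market", "company", "business", "earnings",
--     "revenue", "release", "releases", "update", "updates", "service",
--     "services", "across", "against", "between", "through", "before",
-- })
--
-- def extract_anchors(norm: str) -> tuple[frozenset[str], frozenset[str]]: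
--     """Split a normalised title into (digit_anchors, alpha_anchors).
--
--     - digit anchor: token with >= 1 digit AND >= 1 letter, len >= 2.
--       Pure-digit tokens like "2026" or "100" are excluded — too noisy.
--     - alpha anchor: pure-alpha token len >= 5, not in the stopword set.
--
--     Coalesce adjacent alpha + pure-digit tokens into a compound digit
--     anchor so that "gpt 5 5" (from "GPT 5.5") and "gpt55" (from
--     "GPT-5.5") both produce the anchor "gpt55" and can match each
--     other. Without this, outlets that write version numbers with a
--     space won't cluster with outlets that write them with a hyphen.
--     """
--     tokens = [t for t in norm.split() if t]
--     digit: set[str] = set()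
--     alpha: set[str] = set()
--
--     for tok in tokens:
--         has_d = any(c.isdigit() for c in tok)
--         has_a = any(c.isalpha() for c in tok)
--         if has_d and has_a and len(tok) >= 2:
--             digit.add(tok)
--         elif has_a and not has_d and len(tok) >= 5 and tok not in _STOPWORDS:
--             alpha.add(tok)
--
--     # Second pass: merge "<alpha-run> <digit-run>+" sequences into one
--     # compound digit anchor so "gpt 5 5" (space-delimited from "GPT 5.5")
--     # produces the same "gpt55" anchor as "GPT-5.5" does. Require alpha
--     # length >= 3 to avoid absorbing short prepositions ("to", "in", "at",
--     # "of") into garbage anchors like "to10000".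
--     i = 0
--     n = len(tokens)
--     while i < n:
--         t = tokens[i]
--         if t.isalpha() and len(t) >= 3 and i + 1 < n and tokens[i + 1].isdigit():
--             merged = t
--             j = i + 1
--             while j < n and tokens[j].isdigit():
--                 merged += tokens[j]
--                 j += 1
--             digit.add(merged)
--             i = j
--         else:
--             i += 1
--
--     return frozenset(digit), frozenset(alpha)
-- ===== SOURCE B (Python) =====
-- _STOPWORDS = frozenset({
--     "about", "after", "again", "among", "being", "could", "every",
--     "first", "going", "having", "later", "never", "other", "since",
--     "still", "their", "there", "these", "those", "under", "until",
--     "which", "while", "would", "should", "quarter", "report",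
--     "shares", "stock", "market", "company", "business", "earnings",
--     "revenue", "release", "releases", "update", "updates", "service",
--     "services", "across", "against", "between", "through", "before",
-- })
--
--
-- def extract_anchors(norm: str) -> tuple[frozenset[str], frozenset[str]]:
--     """Derive the three anchor streams independently from the token list:
--     digit and alpha anchors by declarative set comprehensions, and the
--     compound "alpha + digit-run" anchors by a left-to-right state machine
--     that carries a candidate alpha token and its accumulated digit run
--     (no index arithmetic, no inner scan)."""
--     tokens = norm.split()
--     digit = {t for t in tokens
--              if any(c.isdigit() for c in t) and any(c.isalpha() for c in t)
--              and len(t) >= 2}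
--     alpha = {t for t in tokens
--              if any(c.isalpha() for c in t) and not any(c.isdigit() for c in t)
--              and len(t) >= 5 and t not in _STOPWORDS}
--     cand = ""    # alpha token (len >= 3) that may start a compound anchor
--     acc = ""     # concatenation of the digit tokens seen right after cand
--     merged = []
--     for t in tokens:
--         if cand and t.isdigit():
--             acc += t
--         else:
--             if acc:
--                 merged.append(cand + acc)
--             cand = t if t.isalpha() and len(t) >= 3 else ""
--             acc = ""
--     if acc:
--         merged.append(cand + acc)
--     digit.update(merged)
--     return frozenset(digit), frozenset(alpha)
-- ===== Notes on version B (the rewrite author's own statement) =====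
-- stated objective: alternative
-- what changed: A's interleaved classification loop and index-jumping merge scan (with an inner digit-run while loop) are replaced by two declarative set comprehensions for the simple anchors plus a left-to-right state machine carrying a (candidate alpha, accumulated digit run) pair that emits compound anchors with no index arithmetic and no inner scan.
import Mathlib
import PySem

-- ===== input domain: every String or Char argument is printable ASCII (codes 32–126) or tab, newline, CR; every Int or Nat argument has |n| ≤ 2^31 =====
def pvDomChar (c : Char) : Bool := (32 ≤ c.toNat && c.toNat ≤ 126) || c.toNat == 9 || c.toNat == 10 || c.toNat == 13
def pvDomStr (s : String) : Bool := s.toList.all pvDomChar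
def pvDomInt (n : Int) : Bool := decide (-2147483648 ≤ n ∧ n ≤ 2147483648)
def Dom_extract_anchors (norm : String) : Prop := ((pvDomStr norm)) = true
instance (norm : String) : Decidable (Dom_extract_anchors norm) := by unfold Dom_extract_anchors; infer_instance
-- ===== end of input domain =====

-- B replaces A's classification loop + index-jumping merge scan by set comprehensions plus a
-- left-to-right state machine for the compound anchors (alternative decomposition, same cost).

-- Shared constant: the stopword frozenset (identical literal in both Pythons).
def pvStop : PySem.Set (List Char) :=
  ["about".toList, "after".toList, "again".toList, "among".toList, "being".toList,
   "could".toList, "every".toList, "first".toList, "going".toList, "having".toList,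
   "later".toList, "never".toList, "other".toList, "since".toList, "still".toList,
   "their".toList, "there".toList, "these".toList, "those".toList, "under".toList,
   "until".toList, "which".toList, "while".toList, "would".toList, "should".toList,
   "quarter".toList, "report".toList, "shares".toList, "stock".toList, "market".toList,
   "company".toList, "business".toList, "earnings".toList, "revenue".toList,
   "release".toList, "releases".toList, "update".toList, "updates".toList,
   "service".toList, "services".toList, "across".toList, "against".toList,
   "between".toList, "through".toList, "before".toList]

-- any(c.isdigit() for c in tok) / any(c.isalpha() for c in tok)  (used by both Pythons)
def pvHasD (t : List Char) : Bool := t.any PySem.Chars.isdigit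
def pvHasA (t : List Char) : Bool := t.any PySem.Chars.isalpha

-- ===== PORT A =====

-- i + 1 < n and tokens[i+1].isdigit()  (rest = the tokens after position i)
def pvNextDigit (rest : List (List Char)) : Bool :=
  match rest with
  | [] => false
  | r :: _ => PySem.Chars.strIsdigit r

-- A's inner "while j < n and tokens[j].isdigit(): merged += tokens[j]; j += 1" loop:
-- returns (final merged, remaining tokens from j on)
def pvConsume (merged : List Char) : List (List Char) → List Char × List (List Char)
  | [] => (merged, [])
  | d :: rest =>
    if PySem.Chars.strIsdigit d then pvConsume (merged ++ d) rest else (merged, d :: rest)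

theorem pvConsume_snd_le (m : List Char) (l : List (List Char)) :
    (pvConsume m l).2.length ≤ l.length := by
  induction l generalizing m with
  | nil => simp [pvConsume]
  | cons d rest ih =>
    simp only [pvConsume]
    split
    · exact Nat.le_succ_of_le (ih _)
    · simp

-- A's second pass: the index-driven while loop over tokens (index i ↦ the suffix from i)
def pvPass2 : PySem.Set (List Char) → List (List Char) → PySem.Set (List Char)
  | digit, [] => digit
  | digit, t :: rest =>
    if PySem.Chars.strIsalpha t && decide (3 ≤ t.length) && pvNextDigit rest then
      pvPass2 (PySem.Set.add digit (pvConsume t rest).1) (pvConsume t rest).2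
    else
      pvPass2 digit rest
termination_by _ l => l.length
decreasing_by
  · exact Nat.lt_succ_of_le (pvConsume_snd_le t rest)
  · simp

def extract_anchors (norm : String) : List String × List String :=
  let tokens := (PySem.Chars.split₀ norm.toList).filter (fun t => decide (t ≠ []))
  let da := tokens.foldl
    (fun (s : PySem.Set (List Char) × PySem.Set (List Char)) (tok : List Char) =>
      if pvHasD tok && pvHasA tok && decide (2 ≤ tok.length) then
        (PySem.Set.add s.1 tok, s.2)
      else if pvHasA tok && !pvHasD tok && decide (5 ≤ tok.length) && !(pvStop.contains tok) then
        (s.1, PySem.Set.add s.2 tok)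
      else s)
    (PySem.Set.empty, PySem.Set.empty)
  let digit := pvPass2 da.1 tokens
  (digit.map String.ofList, da.2.map String.ofList)

-- ===== PORT B =====

-- B's state-machine step: state = (merged list, cand, acc); one token per step.
def pvStepB (s : List (List Char) × List Char × List Char) (t : List Char) :
    List (List Char) × List Char × List Char :=
  if decide (s.2.1 ≠ []) && PySem.Chars.strIsdigit t then
    (s.1, s.2.1, s.2.2 ++ t)
  else
    ((if s.2.2 ≠ [] then s.1 ++ [s.2.1 ++ s.2.2] else s.1),
     (if PySem.Chars.strIsalpha t && decide (3 ≤ t.length) then t else []),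
     [])

def extract_anchors_alt (norm : String) : List String × List String :=
  let tokens := PySem.Chars.split₀ norm.toList
  -- the two set comprehensions
  let digit := PySem.Set.ofList (tokens.filter (fun t =>
    pvHasD t && pvHasA t && decide (2 ≤ t.length)))
  let alpha := PySem.Set.ofList (tokens.filter (fun t =>
    pvHasA t && !pvHasD t && decide (5 ≤ t.length) && !(pvStop.contains t)))
  -- the state machine over the token stream, plus the trailing flush
  let st := tokens.foldl pvStepB ([], [], [])
  let merged := if st.2.2 ≠ [] then st.1 ++ [st.2.1 ++ st.2.2] else st.1
  let digit := PySem.Set.update digit merged  -- digit.update(merged)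
  (digit.map String.ofList, alpha.map String.ofList)

-- ===== PRECONDITION & SPEC =====
def Spec_extract_anchors (norm : String) (out : List String × List String) : Prop := out = extract_anchors_alt norm
instance (norm : String) (out : List String × List String) : Decidable (Spec_extract_anchors norm out) := by unfold Spec_extract_anchors; infer_instance

-- ===== CLAIM (what is proved, stated in full; the proofs are below) =====
def Claim_equal_extract_anchors : Prop := ∀ (norm : String), Dom_extract_anchors norm → Spec_extract_anchors norm (extract_anchors norm)

-- ===== LEMMAS AND PROOFS =====

-- the merged tokens A's pass 2 adds, in order
def pvCollect : List (List Char) → List (List Char)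
  | [] => []
  | t :: rest =>
    if PySem.Chars.strIsalpha t && decide (3 ≤ t.length) && pvNextDigit rest then
      (pvConsume t rest).1 :: pvCollect (pvConsume t rest).2
    else
      pvCollect rest
termination_by l => l.length
decreasing_by
  · exact Nat.lt_succ_of_le (pvConsume_snd_le t rest)
  · simp

theorem pvPass2_eq (d : PySem.Set (List Char)) (l : List (List Char)) :
    pvPass2 d l = (pvCollect l).foldl PySem.Set.add d := by
  induction d, l using pvPass2.induct with
  | case1 d => simp [pvPass2, pvCollect]
  | case2 d t rest h ih =>
    rw [pvPass2, pvCollect]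
    simp [h, ih]
  | case3 d t rest h ih =>
    rw [pvPass2, pvCollect]
    simp [h, ih]

-- A's interleaved pass 1 equals the two comprehension filters
theorem pvPass1_eq (l : List (List Char)) (d a : PySem.Set (List Char)) :
    l.foldl
      (fun (s : PySem.Set (List Char) × PySem.Set (List Char)) (tok : List Char) =>
        if pvHasD tok && pvHasA tok && decide (2 ≤ tok.length) then
          (PySem.Set.add s.1 tok, s.2)
        else if pvHasA tok && !pvHasD tok && decide (5 ≤ tok.length) && !(pvStop.contains tok) then
          (s.1, PySem.Set.add s.2 tok)
        else s)
      (d, a)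
    = ((l.filter (fun t => pvHasD t && pvHasA t && decide (2 ≤ t.length))).foldl PySem.Set.add d,
       (l.filter (fun t => pvHasA t && !pvHasD t && decide (5 ≤ t.length) && !(pvStop.contains t))).foldl PySem.Set.add a) := by
  induction l generalizing d a with
  | nil => rfl
  | cons t rest ih =>
    rw [List.foldl_cons, List.filter_cons, List.filter_cons]
    by_cases h1 : (pvHasD t && pvHasA t && decide (2 ≤ t.length)) = true
    · have h2 : (pvHasA t && !pvHasD t && decide (5 ≤ t.length) && !(pvStop.contains t)) = false := by
        simp only [Bool.and_eq_true] at h1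
        simp [h1.1.1]
      rw [if_pos h1, ih, h1, h2]
      simp
    · by_cases h2 : (pvHasA t && !pvHasD t && decide (5 ≤ t.length) && !(pvStop.contains t)) = true
      · have h1' := Bool.eq_false_iff.mpr h1
        rw [if_neg h1, if_pos h2, ih, h1', h2]
        simp
      · have h1' := Bool.eq_false_iff.mpr h1
        have h2' := Bool.eq_false_iff.mpr h2
        rw [if_neg h1, if_neg h2, ih, h1', h2']
        simp

-- finalize B's state (the trailing "if acc: merged.append(cand + acc)")
def pvFin (s : List (List Char) × List Char × List Char) : List (List Char) :=
  if s.2.2 ≠ [] then s.1 ++ [s.2.1 ++ s.2.2] else s.1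

-- master invariant: B's state machine collects exactly A's merged tokens
theorem pvLoopB_eq (l : List (List Char)) (m : List (List Char)) (c a : List Char)
    (hc : c = [] ∨ (PySem.Chars.strIsalpha c && decide (3 ≤ c.length)) = true)
    (ha : a ≠ [] → c ≠ []) :
    pvFin (l.foldl pvStepB (m, c, a)) =
      m ++ (if a ≠ [] then
              (pvConsume (c ++ a) l).1 :: pvCollect (pvConsume (c ++ a) l).2
            else if c ≠ [] then pvCollect (c :: l) else pvCollect l) := by
  induction l generalizing m c a with
  | nil =>
    have h0 : pvCollect ([] : List (List Char)) = [] := by rw [pvCollect]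
    have h1 : pvCollect [c] = [] := by rw [pvCollect]; simp [pvNextDigit, h0]
    by_cases ha' : a ≠ []
    · simp [pvFin, pvConsume, h0, ha']
    · simp only [List.foldl_nil, pvFin, ha', if_false, h0, h1]
      by_cases hc' : c ≠ [] <;> simp [hc']
  | cons t rest ih =>
    by_cases hd : (decide (c ≠ []) && PySem.Chars.strIsdigit t) = true
    · -- digit token with an active candidate: accumulate
      rw [Bool.and_eq_true, decide_eq_true_eq] at hd
      have hcne : c ≠ [] := hd.1
      have hcok : (PySem.Chars.strIsalpha c && decide (3 ≤ c.length)) = true := by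
        rcases hc with h | h
        · exact absurd h hcne
        · exact h
      have htne : t ≠ [] := by
        intro h; rw [h] at hd
        simp [PySem.Chars.strIsdigit] at hd
      have hstep : pvStepB (m, c, a) t = (m, c, a ++ t) := by
        simp [pvStepB, hcne, hd.2]
      have hcons : pvConsume (c ++ a) (t :: rest) = pvConsume (c ++ a ++ t) rest := by
        simp [pvConsume, hd.2, List.append_assoc]
      rw [List.foldl_cons, hstep,
        ih m c (a ++ t) (Or.inr hcok) (fun _ => hcne)]
      have hat : a ++ t ≠ [] := by simp [htne]
      rw [if_pos hat, hcons]
      by_cases ha' : a ≠ []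
      · rw [if_pos ha']
        simp [List.append_assoc]
      · have haz : a = [] := by simpa using ha'
        subst haz
        rw [if_neg ha', if_pos hcne]
        have hcol : pvCollect (c :: t :: rest)
            = (pvConsume c (t :: rest)).1 :: pvCollect (pvConsume c (t :: rest)).2 := by
          rw [pvCollect]
          have hnx : pvNextDigit (t :: rest) = true := by simp [pvNextDigit, hd.2]
          rw [if_pos (by simp [hcok, hnx])]
        rw [hcol, show pvConsume c (t :: rest) = pvConsume (c ++ t) rest by
          simp [pvConsume, hd.2]]
        simp
    · -- flush (emit if acc nonempty), reset candidate from t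
      have hnd : c ≠ [] → PySem.Chars.strIsdigit t = false := by
        intro h
        cases hq : PySem.Chars.strIsdigit t
        · rfl
        · exact absurd (by simp [h, hq]) hd
      have hstep : pvStepB (m, c, a) t =
          ((if a ≠ [] then m ++ [c ++ a] else m),
           (if PySem.Chars.strIsalpha t && decide (3 ≤ t.length) then t else []), []) := by
        simp only [pvStepB]
        rw [if_neg (by simpa using hd)]
      set c' : List Char := if PySem.Chars.strIsalpha t && decide (3 ≤ t.length) then t else [] with hc'
      have hc'ok : c' = [] ∨ (PySem.Chars.strIsalpha c' && decide (3 ≤ c'.length)) = true := by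
        rw [hc']; split
        · right; assumption
        · left; rfl
      have htail : (if c' ≠ [] then pvCollect (c' :: rest) else pvCollect rest)
          = pvCollect (t :: rest) := by
        by_cases hta : (PySem.Chars.strIsalpha t && decide (3 ≤ t.length)) = true
        · have htne : t ≠ [] := by
            intro h; rw [h] at hta; simp [PySem.Chars.strIsalpha] at hta
          rw [hc', if_pos hta]
          simp [htne]
        · have hcz : c' = [] := by rw [hc', if_neg hta]
          rw [if_neg (by simp [hcz])]
          rw [show pvCollect (t :: rest) = pvCollect rest by
            rw [pvCollect]
            rw [if_neg (by simp [Bool.eq_false_iff.mpr hta])]]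
      rw [List.foldl_cons, hstep, ih _ c' [] hc'ok (by simp)]
      rw [if_neg (show ¬(([] : List Char) ≠ []) from fun h => h rfl), htail]
      by_cases ha' : a ≠ []
      · have hcne : c ≠ [] := ha ha'
        rw [if_pos ha', if_pos ha',
          show pvConsume (c ++ a) (t :: rest) = (c ++ a, t :: rest) by
            simp [pvConsume, hnd hcne]]
        simp
      · have haz : a = [] := by simpa using ha'
        subst haz
        rw [if_neg ha', if_neg ha']
        by_cases hcne : c ≠ []
        · rw [if_pos hcne,
            show pvCollect (c :: t :: rest) = pvCollect (t :: rest) by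
              rw [pvCollect]
              rw [if_neg (by simp [pvNextDigit, hnd hcne])]]
        · rw [if_neg hcne]

theorem pvSplit₀_go_ne_nil (s cur : List Char) (acc : List (List Char))
    (hacc : ∀ t ∈ acc, t ≠ []) : ∀ t ∈ PySem.Chars.split₀.go s cur acc, t ≠ [] := by
  induction s generalizing cur acc with
  | nil =>
    intro t ht
    rw [PySem.Chars.split₀.go] at ht
    by_cases hcur : cur.isEmpty = true
    · rw [if_pos hcur] at ht
      exact hacc t (List.mem_reverse.mp ht)
    · rw [if_neg hcur] at ht
      rcases List.mem_cons.mp (List.mem_reverse.mp ht) with h | h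
      · subst h
        simp only [List.isEmpty_iff] at hcur
        simpa [List.reverse_eq_nil_iff] using hcur
      · exact hacc t h
  | cons c rest ih =>
    intro t ht
    rw [PySem.Chars.split₀.go] at ht
    by_cases hsp : PySem.Chars.isspace c = true
    · rw [if_pos hsp] at ht
      by_cases hcur : cur.isEmpty = true
      · rw [if_pos hcur] at ht
        exact ih [] acc hacc t ht
      · rw [if_neg hcur] at ht
        refine ih [] (cur.reverse :: acc) ?_ t ht
        intro u hu
        rcases List.mem_cons.mp hu with h | h
        · subst h
          simp only [List.isEmpty_iff] at hcur
          simpa [List.reverse_eq_nil_iff] using hcur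
        · exact hacc u h
    · rw [if_neg hsp] at ht
      exact ih (c :: cur) acc hacc t ht

theorem pvFilter_split₀ (cs : List Char) :
    (PySem.Chars.split₀ cs).filter (fun t => decide (t ≠ [])) = PySem.Chars.split₀ cs := by
  refine List.filter_eq_self.mpr ?_
  intro t ht
  simpa using pvSplit₀_go_ne_nil cs [] [] (by simp) t ht

-- B's merged list equals pvCollect of the token stream
theorem pvMerged_eq (l : List (List Char)) :
    pvFin (l.foldl pvStepB ([], [], [])) = pvCollect l := by
  have := pvLoopB_eq l [] [] [] (Or.inl rfl) (by simp)
  simpa using this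

-- ===== VERDICT (by name: the statement is the Claim_ definition above) =====
theorem extract_anchors_spec : Claim_equal_extract_anchors := by
  intro norm _
  unfold Spec_extract_anchors extract_anchors extract_anchors_alt
  simp only [pvFilter_split₀, pvPass1_eq, pvPass2_eq, PySem.Set.ofList_eq_foldl]
  rw [show PySem.Set.update = fun (s : PySem.Set (List Char)) l => l.foldl PySem.Set.add s from rfl]
  rw [show (if ((PySem.Chars.split₀ norm.toList).foldl pvStepB ([], [], [])).2.2 ≠ [] then
        ((PySem.Chars.split₀ norm.toList).foldl pvStepB ([], [], [])).1 ++
          [((PySem.Chars.split₀ norm.toList).foldl pvStepB ([], [], [])).2.1 ++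
            ((PySem.Chars.split₀ norm.toList).foldl pvStepB ([], [], [])).2.2]
      else ((PySem.Chars.split₀ norm.toList).foldl pvStepB ([], [], [])).1)
      = pvFin ((PySem.Chars.split₀ norm.toList).foldl pvStepB ([], [], [])) from rfl]
  rw [pvMerged_eq]
  rfl
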